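-- pv_equiv track=rewrite | github.com/svinther/AoC | 2022/1.py | parse
-- ===== SOURCE A (Python) =====
-- def parse(input: str):
--     A = []
--     current = []
--     for l in input.split("\n"):
--         l = l.strip()
--         if not l:
--             if current:
--                 A.append(current)
--                 current = []
--             continue
--         cals = int(l)
--         current.append(cals)
--     if current:
--         A.append(current)
--     return A
-- ===== SOURCE B (Python) =====
-- def parse(input: str):
--     # run-scanner over pre-stripped lines: no maintained `current` accumulator, no end-flush
--     lines = [l.strip() for l in input.split("\n")]
--     groups = []
--     i, n = 0, len(lines)
--     while i < n:
--         if not lines[i]: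
--             i += 1
--             continue
--         j = i
--         while j < n and lines[j]:
--             j += 1
--         groups.append([int(x) for x in lines[i:j]])
--         i = j
--     return groups
-- ===== Notes on version B (the rewrite author's own statement) =====
-- stated objective: alternative
-- what changed: Replaces A's stateful accumulate-and-flush loop (a `current` buffer flushed on each blank line and again after the loop) with a two-pointer run scanner over the pre-stripped lines: each maximal run of non-blank lines is located by an inner scan and converted to a group in one step, so no partial-group state or final flush exists.
import Mathlib
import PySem

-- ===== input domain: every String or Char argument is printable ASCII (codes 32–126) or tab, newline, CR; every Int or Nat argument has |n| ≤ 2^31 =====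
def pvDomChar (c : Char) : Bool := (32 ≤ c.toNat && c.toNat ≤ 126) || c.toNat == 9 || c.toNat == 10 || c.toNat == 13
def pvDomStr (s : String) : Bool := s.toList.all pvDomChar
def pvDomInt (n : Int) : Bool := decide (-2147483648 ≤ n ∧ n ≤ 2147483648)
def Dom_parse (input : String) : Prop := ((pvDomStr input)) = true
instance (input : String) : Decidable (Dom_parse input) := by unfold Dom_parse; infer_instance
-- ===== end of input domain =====

-- B replaces A's accumulate-and-flush loop with a run scanner over the pre-stripped lines (alternative decomposition, same cost).

-- int(l) for a stripped line; Pre_parse guarantees ofStr? is some on every such line, so getD 0 is never the result inside Pre_.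
def pvToI (s : String) : Int := (PySem.Int.ofStr? s).getD 0

-- ===== PORT A =====
-- the body of A's for-loop, over the state (A, current)
def parseStep (st : List (List Int) × List Int) (l : String) : List (List Int) × List Int :=
  let l' := PySem.Str.strip l
  if l' = "" then
    if st.2 ≠ [] then (st.1 ++ [st.2], []) else st
  else
    (st.1, st.2 ++ [pvToI l'])

def parse (input : String) : List (List Int) :=
  let p := ((PySem.Str.split? input "\n").getD []).foldl parseStep ([], [])
  if p.2 ≠ [] then p.1 ++ [p.2] else p.1

-- ===== PORT B =====
-- B's outer while-loop: skip a blank line, or scan the maximal non-blank run (the inner while = takeWhile/dropWhile)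
def pvNonblank (x : String) : Bool := x ≠ ""

def pvRuns : List String → List (List Int)
  | [] => []
  | m :: ms =>
    if m = "" then pvRuns ms
    else ((m :: ms.takeWhile pvNonblank).map pvToI) :: pvRuns (ms.dropWhile pvNonblank)
termination_by ms => ms.length
decreasing_by
· simp
· exact Nat.lt_succ_of_le (List.length_dropWhile_le _ _)

def parse_alt (input : String) : List (List Int) :=
  pvRuns (((PySem.Str.split? input "\n").getD []).map PySem.Str.strip)

-- ===== PRECONDITION & SPEC =====
-- Pre_ excludes exactly the inputs where A raises ValueError: a non-blank line whose stripped form is not an int literal.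
def Pre_parse (input : String) : Prop :=
  ∀ l ∈ (PySem.Str.split? input "\n").getD [],
    PySem.Str.strip l ≠ "" → (PySem.Int.ofStr? (PySem.Str.strip l)).isSome = true
instance (input : String) : Decidable (Pre_parse input) := by unfold Pre_parse; infer_instance

def pvWitness_parse : String := "1\n 2 \n\n-3"

def Spec_parse (input : String) (out : List (List Int)) : Prop := out = parse_alt input
instance (input : String) (out : List (List Int)) : Decidable (Spec_parse input out) := by unfold Spec_parse; infer_instance

-- ===== CLAIM (what is proved, stated in full; the proofs are below) =====
def Claim_equal_parse : Prop := ∀ (input : String), Dom_parse input → Pre_parse input → Spec_parse input (parse input)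

-- ===== LEMMAS AND PROOFS =====

-- proof-only characterisation of A's loop state on the stripped lines
def pvP (cur : List Int) : List String → List (List Int)
  | [] => if cur = [] then [] else [cur]
  | m :: ms =>
    if m = "" then (if cur = [] then [] else [cur]) ++ pvP [] ms
    else pvP (cur ++ [pvToI m]) ms

theorem pvP_foldl (ls : List String) : ∀ (A : List (List Int)) (cur : List Int),
    (let p := ls.foldl parseStep (A, cur); if p.2 ≠ [] then p.1 ++ [p.2] else p.1)
      = A ++ pvP cur (ls.map PySem.Str.strip) := by
  induction ls with
  | nil =>
    intro A cur
    by_cases h : cur = [] <;> simp [pvP, h]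
  | cons l ls ih =>
    intro A cur
    by_cases h : PySem.Str.strip l = ""
    · by_cases hc : cur = []
      · simpa [parseStep, h, hc, pvP] using ih A cur
      · simpa [parseStep, h, hc, pvP, List.append_assoc] using ih (A ++ [cur]) []
    · simpa [parseStep, h, pvP] using ih A (cur ++ [pvToI (PySem.Str.strip l)])

theorem pvP_runs (ms : List String) : ∀ cur : List Int,
    pvP cur ms
      = if cur = [] then pvRuns ms
        else (cur ++ (ms.takeWhile pvNonblank).map pvToI) :: pvRuns (ms.dropWhile pvNonblank) := by
  induction ms with
  | nil =>
    intro cur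
    by_cases h : cur = [] <;> simp [pvP, pvRuns, h]
  | cons m ms ih =>
    intro cur
    by_cases h : m = ""
    · by_cases hc : cur = [] <;>
        simp [pvP, pvRuns, pvNonblank, h, hc, ih []]
    · have hb : pvNonblank m = true := by simp [pvNonblank, h]
      have ihne := ih (cur ++ [pvToI m])
      rw [if_neg (by simp)] at ihne
      by_cases hc : cur = []
      · subst hc
        simp [pvP, pvRuns, h]
        simpa using ihne
      · simp [pvP, h, hb, hc, ihne, List.append_assoc]

-- ===== VERDICT (by name: the statement is the Claim_ definition above) =====
theorem parse_spec : Claim_equal_parse := by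
  intro input _ _
  unfold Spec_parse parse parse_alt
  rw [pvP_foldl, pvP_runs]
  simp
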